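-- pv_equiv track=rewrite | github.com/baldFemale/OpenInnovationFramework | Baseline/Compare_Landscape/Landscape.py | cog_state_alternatives
-- ===== SOURCE A (Python) =====
-- from itertools import product
--
-- def cog_state_alternatives(cog_state: list) -> list:
--     alternative_pool = []
--     for bit in cog_state:
--         if bit in ["0", "1", "2", "3"]:
--             alternative_pool.append(bit)
--         elif bit == "A":
--             alternative_pool.append(["0", "1"])
--         elif bit == "B":
--             alternative_pool.append(["2", "3"])
--         elif bit == "*":
--             alternative_pool.append(["0", "1", "2", "3"])
--         else:
--             raise ValueError("Unsupported bit value: ", bit)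
--     return [i for i in product(*alternative_pool)]
-- ===== SOURCE B (Python) =====
-- def cog_state_alternatives(cog_state: list) -> list:
--     def options(bit):
--         if bit in ("0", "1", "2", "3"):
--             return [bit]
--         if bit == "A":
--             return ["0", "1"]
--         if bit == "B":
--             return ["2", "3"]
--         if bit == "*":
--             return ["0", "1", "2", "3"]
--         raise ValueError("Unsupported bit value: ", bit)
--
--     opts = [options(bit) for bit in cog_state]
--     total = 1
--     for o in opts:
--         total *= len(o)
--     out = []
--     for k in range(total):
--         digits = []
--         r = k
--         for o in reversed(opts):
--             r, d = divmod(r, len(o))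
--             digits.append(o[d])
--         out.append(tuple(reversed(digits)))
--     return out
-- ===== Notes on version B (the rewrite author's own statement) =====
-- stated objective: alternative
-- what changed: B counts the total number of combinations and generates each tuple by mixed-radix unranking its index with divmod (no product expansion at all), instead of A's itertools.product over a pool of option lists.
import Mathlib
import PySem

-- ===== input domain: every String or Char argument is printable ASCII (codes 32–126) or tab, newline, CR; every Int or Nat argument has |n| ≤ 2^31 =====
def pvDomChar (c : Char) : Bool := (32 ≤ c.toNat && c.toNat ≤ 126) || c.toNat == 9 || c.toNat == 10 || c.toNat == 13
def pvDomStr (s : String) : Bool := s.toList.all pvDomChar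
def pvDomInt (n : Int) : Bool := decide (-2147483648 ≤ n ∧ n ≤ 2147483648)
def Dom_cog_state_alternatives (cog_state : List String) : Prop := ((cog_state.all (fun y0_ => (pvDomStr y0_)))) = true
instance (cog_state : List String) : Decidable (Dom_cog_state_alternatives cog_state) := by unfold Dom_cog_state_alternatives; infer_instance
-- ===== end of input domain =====

-- B enumerates tuples by mixed-radix unranking of an index counter instead of A's
-- itertools.product expansion; objective: alternative.

-- ===== PORT A =====
-- itertools.product over the pool, ported as a left fold extending each prefix by one element.
def pyProduct (pools : List (List String)) : List (List String) :=
  pools.foldl (fun acc p => acc.flatMap (fun r => p.map (fun x => r ++ [x]))) [[]]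

def cog_state_alternatives (cog_state : List String) : List (List String) :=
  let pool : List (List String) := cog_state.foldl (fun acc bit =>
    if bit ∈ (["0", "1", "2", "3"] : List String) then acc ++ [[bit]]
    else if bit = "A" then acc ++ [["0", "1"]]
    else if bit = "B" then acc ++ [["2", "3"]]
    else if bit = "*" then acc ++ [["0", "1", "2", "3"]]
    else acc ++ [[]]) []   -- Python raises ValueError here; unreachable under Pre_
  pyProduct pool

-- ===== PORT B =====
def optionsB (bit : String) : List String :=
  if bit ∈ (["0", "1", "2", "3"] : List String) then [bit]
  else if bit = "A" then ["0", "1"]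
  else if bit = "B" then ["2", "3"]
  else if bit = "*" then ["0", "1", "2", "3"]
  else []   -- Python raises ValueError here; unreachable under Pre_

-- Source B: total = product of option counts; each k in range(total) is unranked by the
-- inner divmod loop over reversed(opts), then the digit list is reversed into a tuple.
def cog_state_alternatives_alt (cog_state : List String) : List (List String) :=
  let opts : List (List String) := cog_state.map optionsB
  let total : Nat := opts.foldl (fun t o => t * o.length) 1
  (List.range total).map (fun k =>
    let st := opts.reverse.foldl
      (fun (s : Nat × List String) o =>
        (s.1 / o.length, s.2 ++ [o.getD (s.1 % o.length) ""])) (k, ([] : List String))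
    st.2.reverse)

-- ===== PRECONDITION & SPEC =====
-- Pre_ excludes exactly the inputs with an unsupported bit, on which Python A (and B) raise ValueError.
def Pre_cog_state_alternatives (cog_state : List String) : Prop :=
  ∀ bit ∈ cog_state, bit ∈ (["0", "1", "2", "3", "A", "B", "*"] : List String)
instance (cog_state : List String) : Decidable (Pre_cog_state_alternatives cog_state) := by
  unfold Pre_cog_state_alternatives; infer_instance
def pvWitness_cog_state_alternatives : List String := ["A", "2", "*"]
def Spec_cog_state_alternatives (cog_state : List String) (out : List (List String)) : Prop := out = cog_state_alternatives_alt cog_state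
instance (cog_state : List String) (out : List (List String)) : Decidable (Spec_cog_state_alternatives cog_state out) := by unfold Spec_cog_state_alternatives; infer_instance

-- ===== CLAIM =====
def Claim_equal_cog_state_alternatives : Prop := ∀ (cog_state : List String), Dom_cog_state_alternatives cog_state → Pre_cog_state_alternatives cog_state → Spec_cog_state_alternatives cog_state (cog_state_alternatives cog_state)

-- ===== LEMMAS AND PROOFS =====
theorem poolA_eq_map (cog_state : List String) :
    cog_state.foldl (fun acc bit =>
      if bit ∈ (["0", "1", "2", "3"] : List String) then acc ++ [[bit]]
      else if bit = "A" then acc ++ [["0", "1"]]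
      else if bit = "B" then acc ++ [["2", "3"]]
      else if bit = "*" then acc ++ [["0", "1", "2", "3"]]
      else acc ++ [[]]) [] = cog_state.map optionsB := by
  have h : ∀ (acc : List (List String)), cog_state.foldl (fun acc bit =>
      if bit ∈ (["0", "1", "2", "3"] : List String) then acc ++ [[bit]]
      else if bit = "A" then acc ++ [["0", "1"]]
      else if bit = "B" then acc ++ [["2", "3"]]
      else if bit = "*" then acc ++ [["0", "1", "2", "3"]]
      else acc ++ [[]]) acc = acc ++ cog_state.map optionsB := by
    induction cog_state with
    | nil => simp
    | cons c cs ih =>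
      intro acc
      rw [List.foldl_cons, ih, List.map_cons]
      unfold optionsB
      split_ifs <;> simp [List.append_assoc]
  simpa using h []

-- right-fold Cartesian product over a list of pools (characterises A's pyProduct)
def prodR (pools : List (List String)) : List (List String) :=
  pools.foldr (fun p res => p.flatMap (fun o => res.map (fun t => o :: t))) [[]]

theorem pyProduct_flatMap (pools : List (List String)) (acc : List (List String)) :
    pools.foldl (fun acc p => acc.flatMap (fun r => p.map (fun x => r ++ [x]))) acc
      = acc.flatMap (fun r => (prodR pools).map (fun t => r ++ t)) := by
  induction pools generalizing acc with
  | nil => simp [prodR]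
  | cons p ps ih =>
    simp only [List.foldl, ih, prodR, List.foldr]
    simp only [List.flatMap_assoc]
    congr 1
    funext r
    simp only [List.flatMap_map, List.map_flatMap]
    congr 1
    funext x
    simp [List.map_map, Function.comp, List.append_assoc]

theorem pyProduct_eq_prodR (pools : List (List String)) : pyProduct pools = prodR pools := by
  unfold pyProduct
  rw [pyProduct_flatMap]
  simp

-- total number of combinations
def Tp : List (List String) → Nat
  | [] => 1
  | p :: ps => p.length * Tp ps

theorem total_eq (opts : List (List String)) (a : Nat) :
    opts.foldl (fun t o => t * o.length) a = a * Tp opts := by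
  induction opts generalizing a with
  | nil => simp [Tp]
  | cons p ps ih =>
    simp only [List.foldl_cons, ih, Tp]
    ring

-- structural unranking: digit for the front pool, then recurse on the remainder
def gDec : List (List String) → Nat → List String
  | [], _ => []
  | p :: ps, k => p.getD ((k / Tp ps) % p.length) "" :: gDec ps (k % Tp ps)

theorem gDec_mod (ps : List (List String)) (k : Nat) :
    gDec ps (k % Tp ps) = gDec ps k := by
  induction ps generalizing k with
  | nil => simp [gDec]
  | cons q qs ih =>
    simp only [gDec, Tp]
    rw [Nat.mod_mul_left_div_self, Nat.mod_mod_of_dvd _ (dvd_mul_left _ _), ih,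
      Nat.mod_mod_of_dvd _ (dvd_refl q.length)]

-- the inner divmod loop computes exactly gDec (reversed)
theorem fold_decode (opts : List (List String)) (k : Nat) (acc : List String) :
    opts.reverse.foldl
      (fun (s : Nat × List String) o =>
        (s.1 / o.length, s.2 ++ [o.getD (s.1 % o.length) ""])) (k, acc)
      = (k / Tp opts, acc ++ (gDec opts k).reverse) := by
  induction opts generalizing k acc with
  | nil => simp [Tp, gDec]
  | cons p ps ih =>
    simp only [List.reverse_cons, List.foldl_append, ih, List.foldl_cons, List.foldl_nil]
    simp only [Tp, gDec, List.reverse_cons, gDec_mod]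
    rw [Nat.div_div_eq_div_mul, Nat.mul_comm p.length (Tp ps), List.append_assoc]

theorem map_range_mul {α : Type} (a b : Nat) (f : Nat → α) :
    (List.range (a * b)).map f
      = (List.range a).flatMap (fun i => (List.range b).map (fun j => f (i * b + j))) := by
  induction a with
  | zero => simp
  | succ n ih =>
    rw [Nat.succ_mul, List.range_add, List.map_append, ih, List.range_succ,
      List.flatMap_append]
    simp [List.map_map, Function.comp]

theorem flatMap_index {α : Type} (p : List String) (f : String → List α) :
    p.flatMap f = (List.range p.length).flatMap (fun i => f (p.getD i "")) := by
  induction p with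
  | nil => simp
  | cons x xs ih =>
    rw [List.flatMap_cons, ih, List.length_cons, List.range_succ_eq_map,
      List.flatMap_cons, List.flatMap_map]
    simp

theorem prodR_eq_unrank (pools : List (List String)) :
    prodR pools = (List.range (Tp pools)).map (gDec pools) := by
  induction pools with
  | nil => simp [prodR, Tp, gDec, List.range_succ]
  | cons p ps ih =>
    have key : ∀ i ∈ List.range p.length, ∀ j ∈ List.range (Tp ps),
        gDec (p :: ps) (i * Tp ps + j) = p.getD i "" :: gDec ps j := by
      intro i hi j hj
      rw [List.mem_range] at hi hj
      have hT : 0 < Tp ps := Nat.pos_of_ne_zero (by omega)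
      have h1 : (Tp ps * i + j) / Tp ps = i := by
        rw [Nat.mul_add_div hT, Nat.div_eq_of_lt hj, Nat.add_zero]
      have h2 : (Tp ps * i + j) % Tp ps = j := by
        rw [Nat.mul_add_mod, Nat.mod_eq_of_lt hj]
      simp only [gDec]
      rw [Nat.mul_comm i (Tp ps), h1, h2, Nat.mod_eq_of_lt hi]
    rw [show prodR (p :: ps) = p.flatMap (fun o => (prodR ps).map (fun t => o :: t)) from rfl,
      ih, Tp, map_range_mul, flatMap_index]
    apply List.flatMap_congr
    intro i hi
    rw [List.map_map]
    apply List.map_congr_left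
    intro j hj
    exact (key i hi j hj).symm

theorem alt_eq (cs : List String) :
    cog_state_alternatives_alt cs
      = (List.range (Tp (cs.map optionsB))).map (gDec (cs.map optionsB)) := by
  unfold cog_state_alternatives_alt
  simp only [total_eq, Nat.one_mul, fold_decode, List.nil_append, List.reverse_reverse]

-- ===== VERDICT =====
theorem cog_state_alternatives_spec : Claim_equal_cog_state_alternatives := by
  intro cog_state _ _
  unfold Spec_cog_state_alternatives cog_state_alternatives
  rw [alt_eq, poolA_eq_map, pyProduct_eq_prodR, prodR_eq_unrank]
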